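-- pv_equiv track=rewrite | github.com/HSHyun/ktbot | src/digest/run_digest_orchestrator.py | _resolve_digest_hours
-- ===== SOURCE A (Python) =====
-- def _resolve_digest_hours(raw: list[int] | None) -> list[int]:
--     values = raw or [6, 12, 24]
--     seen: set[int] = set()
--     cleaned: list[int] = []
--     for value in values:
--         if value <= 0:
--             raise RuntimeError(f"digest hour must be positive: {value}")
--         if value in seen:
--             continue
--         seen.add(value)
--         cleaned.append(value)
--     cleaned.sort()
--     return cleaned
-- ===== SOURCE B (Python) =====
-- def _insert_unique(sorted_hours, value):
--     # insert value into an ascending duplicate-free list, keeping it so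
--     if not sorted_hours:
--         return [value]
--     head, tail = sorted_hours[0], sorted_hours[1:]
--     if head == value:
--         return sorted_hours
--     if head > value:
--         return [value] + sorted_hours
--     return [head] + _insert_unique(tail, value)
--
--
-- def _resolve_digest_hours(raw: list[int] | None) -> list[int]:
--     result: list[int] = []
--     for value in (raw or [6, 12, 24]):
--         if value <= 0:
--             raise RuntimeError(f"digest hour must be positive: {value}")
--         result = _insert_unique(result, value)
--     return result
-- ===== Notes on version B (the rewrite author's own statement) =====
-- stated objective: alternative
-- what changed: Replaces A's seen-set dedup pass followed by an in-place sort with a single pass that orderly inserts each validated hour into a sorted duplicate-free accumulator (recursive insertion, no set and no sort call).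
import Mathlib
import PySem

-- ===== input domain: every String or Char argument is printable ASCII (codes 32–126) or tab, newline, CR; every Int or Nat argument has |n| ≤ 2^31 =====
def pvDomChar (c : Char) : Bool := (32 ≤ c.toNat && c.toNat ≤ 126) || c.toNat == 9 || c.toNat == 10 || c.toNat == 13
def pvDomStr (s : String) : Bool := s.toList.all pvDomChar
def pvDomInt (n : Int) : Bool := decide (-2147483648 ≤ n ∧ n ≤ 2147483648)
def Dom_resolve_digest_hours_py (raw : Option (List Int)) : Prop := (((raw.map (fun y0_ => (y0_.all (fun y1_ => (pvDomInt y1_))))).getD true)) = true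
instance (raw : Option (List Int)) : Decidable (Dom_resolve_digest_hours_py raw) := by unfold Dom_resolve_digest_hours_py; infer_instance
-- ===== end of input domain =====

-- B replaces A's seen-set dedup + in-place sort with a single pass inserting each validated hour
-- into a sorted duplicate-free accumulator (alternative algorithm; return-value equivalence).


-- ===== PORT A =====
-- 'raw or [6, 12, 24]': falsy raw (None or []) is replaced by the default
def pvValuesA (raw : Option (List Int)) : List Int :=
  match raw with
  | some (v :: rest) => v :: rest
  | _ => [6, 12, 24]

-- A's loop; a value <= 0 raises RuntimeError (modelled as [], excluded by Pre_)
def pvLoopA : List Int → PySem.Set Int → List Int → List Int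
  | [], _, cleaned => cleaned
  | v :: rest, seen, cleaned =>
      if v ≤ 0 then []
      else if PySem.Set.contains seen v then pvLoopA rest seen cleaned
      else pvLoopA rest (PySem.Set.add seen v) (cleaned ++ [v])

def resolve_digest_hours_py (raw : Option (List Int)) : List Int :=
  let values := pvValuesA raw
  let cleaned := pvLoopA values PySem.Set.empty []
  PySem.List.sorted cleaned (fun x => x) false

-- ===== PORT B =====
def pvValuesB (raw : Option (List Int)) : List Int :=
  match raw with
  | some (v :: rest) => v :: rest
  | _ => [6, 12, 24]

-- _insert_unique: ordered insertion into a sorted duplicate-free list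
def pvInsertUnique : List Int → Int → List Int
  | [], value => [value]
  | head :: tail, value =>
      if head == value then head :: tail
      else if head > value then value :: head :: tail
      else head :: pvInsertUnique tail value

-- B's loop; a value <= 0 raises RuntimeError (modelled as [], excluded by Pre_)
def pvLoopB : List Int → List Int → List Int
  | [], result => result
  | value :: rest, result =>
      if value ≤ 0 then []
      else pvLoopB rest (pvInsertUnique result value)

def resolve_digest_hours_py_alt (raw : Option (List Int)) : List Int :=
  pvLoopB (pvValuesB raw) []

-- ===== PRECONDITION & SPEC =====
-- Pre_ excludes exactly the inputs where A raises RuntimeError: a raw list containing a value <= 0.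
def Pre_resolve_digest_hours_py (raw : Option (List Int)) : Prop :=
  ∀ x ∈ raw.getD [], 0 < x
instance (raw : Option (List Int)) : Decidable (Pre_resolve_digest_hours_py raw) := by
  unfold Pre_resolve_digest_hours_py; infer_instance

def pvWitness_resolve_digest_hours_py : Option (List Int) := some [12, 6, 12]

def Spec_resolve_digest_hours_py (raw : Option (List Int)) (out : List Int) : Prop := out = resolve_digest_hours_py_alt raw
instance (raw : Option (List Int)) (out : List Int) : Decidable (Spec_resolve_digest_hours_py raw out) := by unfold Spec_resolve_digest_hours_py; infer_instance

-- ===== CLAIM =====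
def Claim_equal_resolve_digest_hours_py : Prop := ∀ (raw : Option (List Int)), Dom_resolve_digest_hours_py raw → Pre_resolve_digest_hours_py raw → Spec_resolve_digest_hours_py raw (resolve_digest_hours_py raw)

-- ===== LEMMAS AND PROOFS =====
theorem pvLoopA_eq_foldl (vs : List Int) (s : List Int) (h : ∀ v ∈ vs, 0 < v) :
    pvLoopA vs s s = vs.foldl PySem.Set.add s := by
  induction vs generalizing s with
  | nil => rfl
  | cons v rest ih =>
    have hv : 0 < v := h v (by simp)
    have hrest : ∀ x ∈ rest, 0 < x := fun x hx => h x (by simp [hx])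
    simp only [pvLoopA, List.foldl, PySem.Set.add]
    rw [if_neg (by omega)]
    by_cases hc : v ∈ s
    · simp [hc, ih s hrest]
    · simp [hc, ih (s ++ [v]) hrest]

theorem mem_pvInsertUnique (l : List Int) (v x : Int) :
    x ∈ pvInsertUnique l v ↔ x = v ∨ x ∈ l := by
  induction l with
  | nil => simp [pvInsertUnique]
  | cons head tail ih =>
    simp only [pvInsertUnique]
    split_ifs with h1 h2
    · have hv : head = v := by simpa using h1
      subst hv; simp
    · simp
    · simp [ih]; tauto

theorem pairwise_pvInsertUnique (l : List Int) (v : Int) (h : l.Pairwise (· < ·)) :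
    (pvInsertUnique l v).Pairwise (· < ·) := by
  induction l with
  | nil => simp [pvInsertUnique]
  | cons head tail ih =>
    rcases List.pairwise_cons.mp h with ⟨hhead, htail⟩
    simp only [pvInsertUnique]
    split_ifs with h1 h2
    · exact h
    · refine List.pairwise_cons.mpr ⟨?_, h⟩
      intro y hy
      rcases List.mem_cons.mp hy with rfl | hy'
      · exact h2
      · exact lt_trans h2 (hhead y hy')
    · have hlt : head < v := by
        have hne : head ≠ v := by simpa using h1
        omega
      refine List.pairwise_cons.mpr ⟨?_, ih htail⟩
      intro y hy
      rcases (mem_pvInsertUnique tail v y).mp hy with rfl | hy'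
      · exact hlt
      · exact hhead y hy'

theorem pvLoopB_spec (vs : List Int) (acc : List Int)
    (hv : ∀ v ∈ vs, 0 < v) (hacc : acc.Pairwise (· < ·)) :
    (pvLoopB vs acc).Pairwise (· < ·) ∧
      (∀ x, x ∈ pvLoopB vs acc ↔ x ∈ acc ∨ x ∈ vs) := by
  induction vs generalizing acc with
  | nil => exact ⟨hacc, by simp [pvLoopB]⟩
  | cons v rest ih =>
    have h0 : 0 < v := hv v (by simp)
    have hrest : ∀ x ∈ rest, 0 < x := fun x hx => hv x (by simp [hx])
    simp only [pvLoopB, if_neg (by omega : ¬ v ≤ 0)]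
    obtain ⟨hp, hm⟩ := ih (pvInsertUnique acc v) hrest (pairwise_pvInsertUnique acc v hacc)
    refine ⟨hp, fun x => ?_⟩
    rw [hm x, mem_pvInsertUnique]
    simp; tauto

theorem pvValuesB_eq (raw : Option (List Int)) : pvValuesB raw = pvValuesA raw := rfl

theorem pvValues_pos (raw : Option (List Int)) (hp : Pre_resolve_digest_hours_py raw) :
    ∀ v ∈ pvValuesA raw, 0 < v := by
  match raw with
  | none => intro v hv; simp [pvValuesA] at hv; omega
  | some [] => intro v hv; simp [pvValuesA] at hv; omega
  | some (a :: l) => intro v hv; exact hp v (by simpa [pvValuesA] using hv)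

-- ===== VERDICT =====
theorem resolve_digest_hours_py_spec : Claim_equal_resolve_digest_hours_py := by
  intro raw _ hp
  have hpos := pvValues_pos raw hp
  show resolve_digest_hours_py raw = resolve_digest_hours_py_alt raw
  simp only [resolve_digest_hours_py, resolve_digest_hours_py_alt, pvValuesB_eq]
  rw [show PySem.Set.empty = ([] : List Int) from rfl, pvLoopA_eq_foldl _ _ hpos,
    ← PySem.Set.ofList_eq_foldl]
  obtain ⟨hpw, hmem⟩ := pvLoopB_spec (pvValuesA raw) [] hpos List.Pairwise.nil
  refine PySem.List.sorted_eq_of_perm_of_pairwise_lt _ _ _ ?_ (by simpa using hpw)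
  refine (List.perm_ext_iff_of_nodup (hpw.imp ne_of_lt) (PySem.Set.nodup_ofList _)).mpr fun x => ?_
  rw [hmem x, PySem.Set.mem_ofList]; simp
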